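-- pv_equiv track=rewrite | github.com/tarunrajput/Data-Structures-and-Algorithms | Company-Wise-Questions/MountBlue/chairs-requirement.py | minChairs
-- ===== SOURCE A (Python) =====
-- def minChairs(simulations):
--     for ele in simulations:
--         total = 0
--         available = 0
--         for elem1 in ele:
--             if elem1 == 'C':
--                 if available == 0:
--                     total += 1
--                 else:
--                     available-=1
--             elif elem1 == 'R':
--                 available+=1
--             elif elem1=='U':
--                 if available>0:
--                     available-=1
--                 else:
--                     total+=1
--             else:
--                 available+=1
--     return total
-- ===== SOURCE B (Python) =====
-- def minChairs(simulations):
--     for ele in simulations: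
--         balance = 0
--         peak = 0
--         for ch in ele:
--             if ch == 'C' or ch == 'U':
--                 balance += 1
--                 if balance > peak:
--                     peak = balance
--             else:
--                 balance -= 1
--         total = peak
--     return total
-- ===== Notes on version B (the rewrite author's own statement) =====
-- stated objective: simpler
-- what changed: Replaces the greedy pool bookkeeping (total/available with four branches) by a single running balance whose peak is the answer: C/U are +1, everything else -1, and the result is the maximum prefix sum (peak running deficit).
import Mathlib
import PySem

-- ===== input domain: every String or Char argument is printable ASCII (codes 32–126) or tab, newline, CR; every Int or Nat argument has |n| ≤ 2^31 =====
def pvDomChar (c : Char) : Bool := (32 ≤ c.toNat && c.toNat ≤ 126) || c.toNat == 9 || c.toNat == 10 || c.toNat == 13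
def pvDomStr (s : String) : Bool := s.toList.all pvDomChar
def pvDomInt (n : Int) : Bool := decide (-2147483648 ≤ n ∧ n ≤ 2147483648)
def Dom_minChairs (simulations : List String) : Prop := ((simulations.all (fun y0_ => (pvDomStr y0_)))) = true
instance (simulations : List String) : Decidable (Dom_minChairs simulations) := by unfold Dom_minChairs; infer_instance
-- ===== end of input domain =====

-- B replaces A's greedy total/available pool bookkeeping by the peak of a single running
-- balance (C/U = +1, anything else = -1); same cost, simpler. Both raise on empty input
-- (Pre_ excludes it); only the last simulation's result is returned, as in A.


-- ===== PORT A =====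
-- inner loop body of A: state (total, available), branch order as in the Python
def stepA (st : Int × Int) (c : Char) : Int × Int :=
  if c = 'C' then
    (if st.2 = 0 then (st.1 + 1, st.2) else (st.1, st.2 - 1))
  else if c = 'R' then (st.1, st.2 + 1)
  else if c = 'U' then
    (if st.2 > 0 then (st.1, st.2 - 1) else (st.1 + 1, st.2))
  else (st.1, st.2 + 1)

-- outer loop: 'total' is unbound before the first iteration (none); A raises NameError on [],
-- which Pre_ excludes, so the final '.getD 0' is never relevant under Pre_
def minChairs (simulations : List String) : Int :=
  (simulations.foldl (fun _ ele => some (ele.toList.foldl stepA (0, 0)).1) none).getD 0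

-- ===== PORT B =====
-- inner loop body of B: state (balance, peak)
def stepB (st : Int × Int) (c : Char) : Int × Int :=
  if c = 'C' ∨ c = 'U' then
    (st.1 + 1, if st.1 + 1 > st.2 then st.1 + 1 else st.2)
  else (st.1 - 1, st.2)

def minChairs_alt (simulations : List String) : Int :=
  (simulations.foldl (fun _ ele => some (ele.toList.foldl stepB (0, 0)).2) none).getD 0

-- ===== PRECONDITION & SPEC =====
-- Pre_ excludes the empty list, on which both A and B raise NameError ('total' never bound)
def Pre_minChairs (simulations : List String) : Prop := simulations ≠ []
instance (simulations : List String) : Decidable (Pre_minChairs simulations) := by unfold Pre_minChairs; infer_instance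
def pvWitness_minChairs : List String := ["CRCU"]
def Spec_minChairs (simulations : List String) (out : Int) : Prop := out = minChairs_alt simulations
instance (simulations : List String) (out : Int) : Decidable (Spec_minChairs simulations out) := by unfold Spec_minChairs; infer_instance

-- ===== CLAIM (what is proved, stated in full; the proofs are below) =====
def Claim_equal_minChairs : Prop := ∀ (simulations : List String), Dom_minChairs simulations → Pre_minChairs simulations → Spec_minChairs simulations (minChairs simulations)

-- ===== LEMMAS AND PROOFS =====

-- invariant: A's state is (peak, peak - balance) where B's state is (balance, peak), balance ≤ peak
lemma inner_inv (cs : List Char) : ∀ (peak balance : Int), balance ≤ peak →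
    (cs.foldl stepA (peak, peak - balance)).1 = (cs.foldl stepB (balance, peak)).2 := by
  induction cs with
  | nil => intro peak balance _; simp
  | cons c cs ih =>
    intro peak balance hle
    simp only [List.foldl_cons]
    by_cases hCU : c = 'C' ∨ c = 'U'
    · by_cases hfull : balance = peak
      · have hA : stepA (peak, peak - balance) c = (peak + 1, peak + 1 - (balance + 1)) := by
          rcases hCU with h | h <;> subst h <;> simp [stepA, hfull]
        have hB : stepB (balance, peak) c = (balance + 1, peak + 1) := by
          simp [stepB, hCU, hfull]
        rw [hA, hB]; exact ih (peak + 1) (balance + 1) (by omega)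
      · have hlt : balance < peak := lt_of_le_of_ne hle hfull
        have hA : stepA (peak, peak - balance) c = (peak, peak - (balance + 1)) := by
          have hne : peak - balance ≠ 0 := by omega
          rcases hCU with h | h <;> subst h <;> simp [stepA, hne, hlt, Prod.ext_iff] <;> omega
        have hB : stepB (balance, peak) c = (balance + 1, peak) := by
          simp [stepB, hCU]; omega
        rw [hA, hB]; exact ih peak (balance + 1) (by omega)
    · have hA : stepA (peak, peak - balance) c = (peak, peak - (balance - 1)) := by
        push Not at hCU
        simp only [stepA, if_neg hCU.1, if_neg hCU.2]
        by_cases hR : c = 'R' <;> simp [hR] <;> ring_nf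
      have hB : stepB (balance, peak) c = (balance - 1, peak) := by
        simp [stepB, hCU]
      rw [hA, hB]; exact ih peak (balance - 1) (by omega)

lemma inner_eq (s : String) :
    (s.toList.foldl stepA (0, 0)).1 = (s.toList.foldl stepB (0, 0)).2 := by
  have := inner_inv s.toList 0 0 le_rfl
  simpa using this

-- ===== VERDICT (by name: the statement is the Claim_ definition above) =====
theorem minChairs_spec : Claim_equal_minChairs := by
  intro simulations _ _
  unfold Spec_minChairs minChairs minChairs_alt
  congr 2
  funext _ ele
  rw [inner_eq]
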